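-- pv_equiv track=rewrite | github.com/meumeunome/IA-trab1 | aux_problema_mochila.py | vizinhos_mais_proximos
-- ===== SOURCE A (Python) =====
-- def peso_total(s, pes):
--     soma = 0
--     for i in range(len(s)):
--         soma += s[i] * pes[i]
--     return soma
--
-- def mochila_excede(s, pes, pes_max):
--     return peso_total(s, pes) > pes_max
--
-- def vizinhos_mais_proximos(s, pes, pes_max):
--     lista_vizinhos = []
--
--     for aux in range(len(s)):
--         vizinho = list(s)
--         vizinho[aux] += 1
--         if not mochila_excede(vizinho, pes, pes_max):
--             lista_vizinhos.append(vizinho)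
--
--     return list(lista_vizinhos)
-- ===== SOURCE B (Python) =====
-- def vizinhos_mais_proximos(s, pes, pes_max):
--     total = sum(x * w for x, w in zip(s, pes))
--     return [s[:i] + [s[i] + 1] + s[i + 1:]
--             for i in range(len(s))
--             if total + pes[i] <= pes_max]
-- ===== Notes on version B (the rewrite author's own statement) =====
-- stated objective: faster
-- what changed: B computes the knapsack weight once (sum over zip) and tests each neighbor with an O(1) incremental check total+pes[i]<=pes_max, building the neighbor by slicing, instead of copying s, mutating it and recomputing the full weight for every index.
import Mathlib
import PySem

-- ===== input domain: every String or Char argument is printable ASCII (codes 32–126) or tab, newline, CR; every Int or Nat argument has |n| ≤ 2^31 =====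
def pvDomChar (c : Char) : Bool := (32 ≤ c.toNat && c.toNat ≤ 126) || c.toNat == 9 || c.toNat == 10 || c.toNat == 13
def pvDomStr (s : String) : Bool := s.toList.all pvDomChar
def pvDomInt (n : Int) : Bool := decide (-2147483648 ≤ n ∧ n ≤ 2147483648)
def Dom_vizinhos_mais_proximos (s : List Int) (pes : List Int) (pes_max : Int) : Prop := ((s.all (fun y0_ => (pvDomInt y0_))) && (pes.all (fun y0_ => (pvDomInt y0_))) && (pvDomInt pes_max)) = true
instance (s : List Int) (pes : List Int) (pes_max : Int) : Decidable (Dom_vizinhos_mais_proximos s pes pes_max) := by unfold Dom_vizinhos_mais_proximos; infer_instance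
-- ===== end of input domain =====

-- B replaces A's per-index full recomputation of the knapsack weight by one precomputed
-- total plus an O(1) incremental test (objective: faster, constant-factor).

-- ===== PORT A =====
-- soma = 0; for i in range(len(s)): soma += s[i]*pes[i]   (indexing exact under Pre_)
def peso_total (s : List Int) (pes : List Int) : Int :=
  (PySem.List.pyRange 0 (s.length : Int) 1).foldl
    (fun soma i => soma + PySem.List.pyGetD s i 0 * PySem.List.pyGetD pes i 0) 0

def mochila_excede (s : List Int) (pes : List Int) (pes_max : Int) : Bool :=
  decide (peso_total s pes > pes_max)

-- vizinho = list(s); vizinho[aux] += 1 is written out inline (twice) instead of a `let`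
def vizinhos_mais_proximos (s : List Int) (pes : List Int) (pes_max : Int) : List (List Int) :=
  (PySem.List.pyRange 0 (s.length : Int) 1).foldl
    (fun lista aux =>
      if !(mochila_excede (PySem.List.pySetD s aux (PySem.List.pyGetD s aux 0 + 1)) pes pes_max)
      then lista ++ [PySem.List.pySetD s aux (PySem.List.pyGetD s aux 0 + 1)]
      else lista)
    []

-- ===== PORT B =====
-- total = sum(x*w for x,w in zip(s,pes)); list comprehension with O(1) test total+pes[i]<=pes_max
def vizinhos_mais_proximos_alt (s : List Int) (pes : List Int) (pes_max : Int) : List (List Int) :=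
  let total := (s.zip pes).foldl (fun acc xw => acc + xw.1 * xw.2) 0
  ((List.range s.length).filter
      (fun (i : Nat) => decide (total + PySem.List.pyGetD pes ((i : Nat) : Int) 0 ≤ pes_max))).map
    (fun (i : Nat) => s.take i ++ [PySem.List.pyGetD s ((i : Nat) : Int) 0 + 1] ++ s.drop (i + 1))

-- ===== PRECONDITION & SPEC =====
-- Pre_ excludes len(pes) < len(s): there both A and B raise IndexError on pes[i].
def Pre_vizinhos_mais_proximos (s : List Int) (pes : List Int) (pes_max : Int) : Prop :=
  s.length ≤ pes.length
instance (s : List Int) (pes : List Int) (pes_max : Int) : Decidable (Pre_vizinhos_mais_proximos s pes pes_max) := by unfold Pre_vizinhos_mais_proximos; infer_instance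

def pvWitness_vizinhos_mais_proximos : List Int × List Int × Int := ([1, 0], [2, 3], 5)

def Spec_vizinhos_mais_proximos (s : List Int) (pes : List Int) (pes_max : Int) (out : List (List Int)) : Prop := out = vizinhos_mais_proximos_alt s pes pes_max
instance (s : List Int) (pes : List Int) (pes_max : Int) (out : List (List Int)) : Decidable (Spec_vizinhos_mais_proximos s pes pes_max out) := by unfold Spec_vizinhos_mais_proximos; infer_instance

-- ===== CLAIM (what is proved, stated in full; the proofs are below) =====
def Claim_equal_vizinhos_mais_proximos : Prop := ∀ (s : List Int) (pes : List Int) (pes_max : Int), Dom_vizinhos_mais_proximos s pes pes_max → Pre_vizinhos_mais_proximos s pes pes_max → Spec_vizinhos_mais_proximos s pes pes_max (vizinhos_mais_proximos s pes pes_max)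

-- ===== LEMMAS AND PROOFS =====

theorem pv_pyRange_nat (n : Nat) :
    PySem.List.pyRange 0 (n : Int) 1 = (List.range n).map (fun k : Nat => (k : Int)) := by
  rw [PySem.List.pyRange_one]
  simp only [sub_zero, Int.toNat_natCast, zero_add]

theorem pv_foldl_add_int {α : Type} (l : List α) (f : α → Int) (init : Int) :
    l.foldl (fun acc x => acc + f x) init = init + (l.map f).sum := by
  induction l generalizing init with
  | nil => simp
  | cons x xs ih => simp [ih, add_assoc]

theorem pv_foldl_congr_mem {α β : Type} (l : List α) (f g : β → α → β) (init : β)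
    (h : ∀ acc x, x ∈ l → f acc x = g acc x) : l.foldl f init = l.foldl g init := by
  induction l generalizing init with
  | nil => rfl
  | cons x xs ih =>
    simp only [List.foldl_cons]
    rw [h init x (by simp)]
    exact ih _ (fun acc y hy => h acc y (by simp [hy]))

theorem pv_rangeprod (s pes : List Int) (h : s.length ≤ pes.length) :
    ((List.range s.length).map (fun i => s.getD i 0 * pes.getD i 0)).sum
      = ((s.zip pes).map (fun p => p.1 * p.2)).sum := by
  induction s generalizing pes with
  | nil => simp
  | cons x s' ih =>
    cases pes with
    | nil => simp at h
    | cons w pes' =>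
      simp only [List.length_cons, List.range_succ_eq_map, List.map_cons, List.map_map,
        List.sum_cons, List.zip_cons_cons]
      have : ((List.range s'.length).map
          ((fun i => (x :: s').getD i 0 * (w :: pes').getD i 0) ∘ Nat.succ)).sum
          = ((s'.zip pes').map (fun p => p.1 * p.2)).sum := by
        simpa using ih pes' (by simpa using h)
      simp only [List.getD_cons_zero] at *
      rw [this]

theorem pv_zipsum_set (s pes : List Int) (k : Nat) (hk : k < s.length)
    (h : s.length ≤ pes.length) :
    (((s.set k (s.getD k 0 + 1)).zip pes).map (fun p => p.1 * p.2)).sum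
      = ((s.zip pes).map (fun p => p.1 * p.2)).sum + pes.getD k 0 := by
  induction s generalizing pes k with
  | nil => simp at hk
  | cons x s' ih =>
    cases pes with
    | nil => simp at h
    | cons w pes' =>
      cases k with
      | zero => simp [add_mul]; ring
      | succ k' =>
        simp only [List.set_cons_succ, List.getD_cons_succ, List.zip_cons_cons,
          List.map_cons, List.sum_cons]
        rw [ih pes' k' (by simpa using hk) (by simpa using h)]
        ring

theorem pv_peso_eq (s pes : List Int) (h : s.length ≤ pes.length) :
    peso_total s pes = ((s.zip pes).map (fun p => p.1 * p.2)).sum := by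
  unfold peso_total
  rw [pv_pyRange_nat, List.foldl_map]
  simp only [PySem.List.pyGetD_natCast]
  rw [pv_foldl_add_int, zero_add, pv_rangeprod s pes h]

-- ===== VERDICT (by name: the statement is the Claim_ definition above) =====
theorem vizinhos_mais_proximos_spec : Claim_equal_vizinhos_mais_proximos := by
  intro s pes pes_max _ hpre
  unfold Pre_vizinhos_mais_proximos at hpre
  unfold Spec_vizinhos_mais_proximos vizinhos_mais_proximos vizinhos_mais_proximos_alt
  rw [pv_foldl_add_int, zero_add]
  rw [pv_pyRange_nat, List.foldl_map]
  rw [pv_foldl_congr_mem _ _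
      (fun lista k =>
        if decide (((s.zip pes).map (fun p => p.1 * p.2)).sum + pes.getD k 0 ≤ pes_max)
        then lista ++ [s.set k (s.getD k 0 + 1)] else lista) []
      ?_]
  · rw [PySem.List.foldl_append_if]
    simp only [List.nil_append, PySem.List.pyGetD_natCast]
    apply List.map_congr_left
    intro k hk
    have hklt : k < s.length := List.mem_range.mp (List.mem_of_mem_filter hk)
    rw [List.set_eq_take_cons_drop _ hklt]
    simp
  · intro acc k hkmem
    have hklt : k < s.length := List.mem_range.mp hkmem
    simp only [PySem.List.pySetD_natCast, PySem.List.pyGetD_natCast]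
    unfold mochila_excede
    rw [pv_peso_eq _ pes (by simpa using hpre)]
    rw [pv_zipsum_set s pes k hklt hpre]
    simp [not_lt]
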